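-- pv_equiv track=rewrite | github.com/austinliu05/Connect4 | Connect4.py | rowValue
-- ===== SOURCE A (Python) =====
-- def isPos(n):
--     if(n > 0):
--         return True
--     else:
--         return False
--
-- def rowValue(lst, score, count, disc):
--     for i, val in enumerate(lst):
--         if(isPos(val) == isPos(disc)):
--             count+=1
--         else:
--             count = 0
--         if(count == 3):
--             score += 9 * val
--         elif(count == 2):
--             score += 3 * val
--         elif(count == 1):
--             score += val
--     return score
-- ===== SOURCE B (Python) =====
-- def rowValue(lst, score, count, disc):
--     # Run-based rewrite: split the row into maximal same-sign runs and score
--     # only the runs matching disc's sign, via a position->weight table.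
--     W = {1: 1, 2: 3, 3: 9}
--     match = disc > 0
--     i, n = 0, len(lst)
--     while i < n:
--         key = lst[i] > 0
--         j = i
--         while j < n and (lst[j] > 0) == key:
--             j += 1
--         if key == match:
--             pos = count if i == 0 else 0
--             for val in lst[i:j]:
--                 pos += 1
--                 score += val * W.get(pos, 0)
--         i = j
--     return score
-- ===== Notes on version B (the rewrite author's own statement) =====
-- stated objective: alternative
-- what changed: Replaces A's per-element counter with an if-chain by a run decomposition: B splits the row into maximal same-sign runs with a two-pointer scan, skips runs not matching disc's sign, and scores matching runs via a position-to-weight table {1:1,2:3,3:9}, carrying the incoming count only into a matching run that starts at index 0.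
import Mathlib
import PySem

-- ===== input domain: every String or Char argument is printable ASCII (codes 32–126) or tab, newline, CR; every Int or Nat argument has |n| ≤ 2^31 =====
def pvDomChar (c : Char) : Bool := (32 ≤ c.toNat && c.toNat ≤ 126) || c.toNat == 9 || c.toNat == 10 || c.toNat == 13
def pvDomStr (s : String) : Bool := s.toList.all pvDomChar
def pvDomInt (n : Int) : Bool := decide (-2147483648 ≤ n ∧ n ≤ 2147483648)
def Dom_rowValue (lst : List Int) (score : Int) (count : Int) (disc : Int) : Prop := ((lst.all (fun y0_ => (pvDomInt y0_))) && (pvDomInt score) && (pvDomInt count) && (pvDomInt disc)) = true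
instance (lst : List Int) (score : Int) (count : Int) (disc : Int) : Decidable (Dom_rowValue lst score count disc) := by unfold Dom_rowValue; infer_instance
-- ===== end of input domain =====

-- B rewrites A's per-element counter loop as a run decomposition (maximal same-sign
-- runs, weight table {1:1,2:3,3:9}); objective: alternative decomposition, same cost.

-- ===== PORT A =====
def isPos (n : Int) : Bool := if n > 0 then true else false

def rowValueStep (disc : Int) (p : Int × Int) (val : Int) : Int × Int :=
  let count := if isPos val = isPos disc then p.2 + 1 else 0
  let score :=
    if count = 3 then p.1 + 9 * val
    else if count = 2 then p.1 + 3 * val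
    else if count = 1 then p.1 + val
    else p.1
  (score, count)

def rowValue (lst : List Int) (score : Int) (count : Int) (disc : Int) : Int :=
  (lst.foldl (rowValueStep disc) (score, count)).1

-- ===== PORT B =====
-- the weight dict W = {1: 1, 2: 3, 3: 9}
def wTable : PySem.Dict Int Int := PySem.Dict.ofList [(1, 1), (2, 3), (3, 9)]

-- inner while loop `while j < n and (lst[j] > 0) == key: j += 1`:
-- returns (the run lst[i:j], the remainder lst[j:])
def spanKey (key : Bool) : List Int → List Int × List Int
  | [] => ([], [])
  | v :: rest =>
    if decide (v > 0) = key then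
      let p := spanKey key rest
      (v :: p.1, p.2)
    else ([], v :: rest)

theorem spanKey_snd_length (key : Bool) (l : List Int) :
    (spanKey key l).2.length ≤ l.length := by
  induction l with
  | nil => simp [spanKey]
  | cons v rest ih =>
    simp only [spanKey]
    split
    · simpa using Nat.le_succ_of_le ih
    · simp

-- the for-loop `for val in lst[i:j]: pos += 1; score += val * W.get(pos, 0)`
def runScore (score pos : Int) (run : List Int) : Int × Int :=
  run.foldl (fun p val => (p.1 + val * wTable.getD (p.2 + 1) 0, p.2 + 1)) (score, pos)

-- outer while loop; `first` tracks `i == 0`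
def altGo (l : List Int) (score count : Int) (m : Bool) (first : Bool) : Int :=
  match l with
  | [] => score
  | v :: rest =>
    let key := decide (v > 0)
    let sp := spanKey key rest
    if key = m then
      altGo sp.2 (runScore score (if first then count else 0) (v :: sp.1)).1 count m false
    else
      altGo sp.2 score count m false
termination_by l.length
decreasing_by
  all_goals exact Nat.lt_succ_of_le (spanKey_snd_length _ rest)

def rowValue_alt (lst : List Int) (score : Int) (count : Int) (disc : Int) : Int :=
  altGo lst score count (decide (disc > 0)) true

-- ===== PRECONDITION & SPEC =====
def Spec_rowValue (lst : List Int) (score : Int) (count : Int) (disc : Int) (out : Int) : Prop := out = rowValue_alt lst score count disc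
instance (lst : List Int) (score : Int) (count : Int) (disc : Int) (out : Int) : Decidable (Spec_rowValue lst score count disc out) := by unfold Spec_rowValue; infer_instance

-- ===== CLAIM (what is proved, stated in full; the proofs are below) =====
def Claim_equal_rowValue : Prop := ∀ (lst : List Int) (score : Int) (count : Int) (disc : Int), Dom_rowValue lst score count disc → Spec_rowValue lst score count disc (rowValue lst score count disc)

-- ===== LEMMAS AND PROOFS =====

theorem isPos_eq (n : Int) : isPos n = decide (n > 0) := by
  simp [isPos]

theorem spanKey_append (key : Bool) (l : List Int) :
    (spanKey key l).1 ++ (spanKey key l).2 = l := by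
  induction l with
  | nil => simp [spanKey]
  | cons v rest ih =>
    simp only [spanKey]
    split
    · simpa using ih
    · simp

theorem spanKey_all (key : Bool) (l : List Int) :
    ∀ v ∈ (spanKey key l).1, decide (v > 0) = key := by
  induction l with
  | nil => simp [spanKey]
  | cons v rest ih =>
    simp only [spanKey]
    split
    · rename_i h
      intro w hw
      rcases List.mem_cons.mp hw with rfl | hw
      · exact h
      · exact ih w hw
    · simp

theorem spanKey_snd_head (key : Bool) (l : List Int) (w : Int) (ws : List Int)
    (h : (spanKey key l).2 = w :: ws) : decide (w > 0) ≠ key := by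
  induction l with
  | nil => simp [spanKey] at h
  | cons v rest ih =>
    simp only [spanKey] at h
    split at h
    · exact ih h
    · rename_i hne
      obtain ⟨rfl, rfl⟩ : v = w ∧ rest = ws := by simpa using h
      exact hne

theorem wTable_getD (k : Int) :
    wTable.getD k 0 = if k = 1 then 1 else if k = 2 then 3 else if k = 3 then 9 else 0 := by
  have hw : wTable = PySem.Dict.mk [(1, 1), (2, 3), (3, 9)] := by decide
  rw [hw, PySem.Dict.getD_eq_get?_getD]
  simp only [PySem.Dict.get?_mk_cons, beq_iff_eq]
  split_ifs with h1 h2 h3 <;> simp [PySem.Dict.get?] <;> omega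

-- matching element: A's step is B's weighted add
theorem step_match (disc v s c : Int) (h : isPos v = isPos disc) :
    rowValueStep disc (s, c) v = (s + v * wTable.getD (c + 1) 0, c + 1) := by
  simp only [rowValueStep, h, wTable_getD]
  split_ifs <;> simp_all <;> ring

-- non-matching element: A's step resets the counter and adds nothing
theorem step_nomatch (disc v s c : Int) (h : isPos v ≠ isPos disc) :
    rowValueStep disc (s, c) v = (s, 0) := by
  simp [rowValueStep, h]

theorem fold_match_run (disc : Int) (run : List Int)
    (h : ∀ v ∈ run, isPos v = isPos disc) :
    ∀ s c, run.foldl (rowValueStep disc) (s, c) = runScore s c run := by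
  induction run with
  | nil => intro s c; rfl
  | cons v rest ih =>
    intro s c
    have hv : isPos v = isPos disc := h v (List.mem_cons_self)
    simp only [List.foldl_cons, step_match disc v s c hv, runScore, List.foldl_cons]
    exact ih (fun w hw => h w (List.mem_cons_of_mem _ hw)) _ _

theorem fold_nomatch_run (disc : Int) (run : List Int) (hne : run ≠ [])
    (h : ∀ v ∈ run, isPos v ≠ isPos disc) :
    ∀ s c, run.foldl (rowValueStep disc) (s, c) = (s, 0) := by
  induction run with
  | nil => exact absurd rfl hne
  | cons v rest ih =>
    intro s c
    have hv : isPos v ≠ isPos disc := h v (List.mem_cons_self)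
    simp only [List.foldl_cons, step_nomatch disc v s c hv]
    rcases rest with - | ⟨w, ws⟩
    · rfl
    · exact ih (by simp) (fun w hw => h w (List.mem_cons_of_mem _ hw)) s 0

-- the counter value is irrelevant when the next element does not match (or the tail is empty)
theorem fold_tail_count_irrel (disc : Int) (tail : List Int)
    (h : ∀ w ws, tail = w :: ws → isPos w ≠ isPos disc) (s c c' : Int) :
    (tail.foldl (rowValueStep disc) (s, c)).1 = (tail.foldl (rowValueStep disc) (s, c')).1 := by
  rcases tail with - | ⟨w, ws⟩
  · rfl
  · have hw := h w ws rfl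
    simp only [List.foldl_cons, step_nomatch disc w s c hw, step_nomatch disc w s c' hw]

-- altGo with first = false ignores count; with count = 0 the flag is irrelevant
theorem altGo_false_eq (n : ℕ) : ∀ (l : List Int) (s c : Int) (m : Bool),
    l.length ≤ n → altGo l s c m false = altGo l s 0 m true := by
  induction n with
  | zero =>
    intro l s c m hl
    rw [List.length_eq_zero_iff.mp (Nat.le_zero.mp hl)]
    simp [altGo]
  | succ n ih =>
    intro l s c m hl
    rcases l with - | ⟨v, rest⟩
    · simp [altGo]
    · have hlen : (spanKey (decide (v > 0)) rest).2.length ≤ n :=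
        le_trans (spanKey_snd_length _ rest) (by simpa using hl)
      rw [altGo, altGo]
      simp only [Bool.false_eq_true, if_false, if_true]
      split
      · rw [ih _ _ c _ hlen, ih _ _ 0 _ hlen]
      · rw [ih _ _ c _ hlen, ih _ _ 0 _ hlen]

theorem fold_eq_altGo (n : ℕ) : ∀ (l : List Int) (s c disc : Int),
    l.length ≤ n →
    (l.foldl (rowValueStep disc) (s, c)).1 = altGo l s c (isPos disc) true := by
  induction n with
  | zero =>
    intro l s c disc hl
    rw [List.length_eq_zero_iff.mp (Nat.le_zero.mp hl)]
    simp [altGo]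
  | succ n ih =>
    intro l s c disc hl
    rcases l with - | ⟨v, rest⟩
    · simp [altGo]
    · set key := decide (v > 0) with hkey
      set sp := spanKey key rest with hsp
      have hsplit : v :: rest = (v :: sp.1) ++ sp.2 := by
        simp [hsp, spanKey_append key rest]
      have hlen : sp.2.length ≤ n := le_trans (spanKey_snd_length _ rest) (by simpa using hl)
      have htail : ∀ w ws, sp.2 = w :: ws → decide (w > 0) ≠ key :=
        fun w ws h => spanKey_snd_head key rest w ws (hsp ▸ h)
      rw [altGo]
      by_cases hm : key = isPos disc
      · -- matching run
        have hall : ∀ u ∈ v :: sp.1, isPos u = isPos disc := by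
          intro u hu
          rcases List.mem_cons.mp hu with rfl | hu
          · rw [isPos_eq, ← hkey, hm]
          · rw [isPos_eq, spanKey_all key rest u (hsp ▸ hu), hm]
        have htail' : ∀ w ws, sp.2 = w :: ws → isPos w ≠ isPos disc := by
          intro w ws h
          rw [isPos_eq, ← hm]
          exact htail w ws h
        rw [hsplit, List.foldl_append, fold_match_run disc _ hall s c]
        rcases hrs : runScore s c (v :: sp.1) with ⟨s', p'⟩
        rw [fold_tail_count_irrel disc sp.2 htail' s' p' 0, ih sp.2 s' 0 disc hlen,
          ← altGo_false_eq n sp.2 s' c (isPos disc) hlen]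
        simp only [← hkey, ← hsp, if_pos hm, ite_true, hrs]
      · -- non-matching run: A resets the counter and adds nothing across it
        have hall : ∀ u ∈ v :: sp.1, isPos u ≠ isPos disc := by
          intro u hu
          rcases List.mem_cons.mp hu with rfl | hu
          · rw [isPos_eq, ← hkey]; exact hm
          · rw [isPos_eq, spanKey_all key rest u (hsp ▸ hu)]; exact hm
        rw [hsplit, List.foldl_append, fold_nomatch_run disc _ (by simp) hall s c,
          ih sp.2 s 0 disc hlen, ← altGo_false_eq n sp.2 s c (isPos disc) hlen]
        simp only [← hkey, ← hsp, if_neg hm]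

-- ===== VERDICT (by name: the statement is the Claim_ definition above) =====
theorem rowValue_spec : Claim_equal_rowValue := by
  intro lst score count disc _
  unfold Spec_rowValue rowValue rowValue_alt
  rw [fold_eq_altGo lst.length lst score count disc (le_refl _), isPos_eq]
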